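-- pv_equiv track=rewrite | github.com/v-garmed/Enfoques_IA | ENFOQUES/03_ENFOQUE LOGICA/006_APRENDIZAJE INDUCTIVO/007_Espacio de versiones.py | aprender_descripcion_general
-- ===== SOURCE A (Python) =====
-- def aprender_descripcion_general(positivos, negativos):
--     # Inicializar la descripción general con la intersección de los atributos de los ejemplos positivos
--     descripcion = {}
--     for key in positivos[0].keys():  # Iterar sobre las claves (atributos) de los ejemplos
--         # Obtener los valores del atributo actual en todos los ejemplos positivos
--         valores = [e[key] for e in positivos]
--         # Si todos los valores son iguales, incluir ese valor en la descripción
--         if all(val == valores[0] for val in valores):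
--             descripcion[key] = valores[0]
--         else:
--             # Si los valores son diferentes, usar '?' como comodín
--             descripcion[key] = '?'
--
--     # Refinar la descripción eliminando condiciones que cubren ejemplos negativos
--     for negativo in negativos:  # Iterar sobre los ejemplos negativos
--         for key in descripcion:  # Revisar cada atributo en la descripción
--             # Si un atributo específico coincide con un ejemplo negativo, generalizarlo a '?'
--             if descripcion[key] != '?' and descripcion[key] == negativo[key]:
--                 descripcion[key] = '?'
--     return descripcion  # Retornar la descripción general aprendida
-- ===== SOURCE B (Python) =====
-- def aprender_descripcion_general(positivos, negativos):
--     # Find-S style streaming pass: start from the first positive example as the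
--     # hypothesis and generalize it attribute by attribute over ONE merged stream
--     # of labeled examples (row-wise), instead of A's two staged phases
--     # (column-wise agreement test over positives, then refinement by negatives).
--     hipotesis = dict(positivos[0])
--     etiquetados = [(e, True) for e in positivos[1:]] + [(n, False) for n in negativos]
--     for ejemplo, es_positivo in etiquetados:
--         for k in hipotesis:
--             if hipotesis[k] != '?' and (ejemplo[k] != hipotesis[k]) == es_positivo:
--                 hipotesis[k] = '?'
--     return hipotesis
-- ===== Notes on version B (the rewrite author's own statement) =====
-- stated objective: alternative
-- what changed: Replaces A's two staged phases (column-wise: collect each attribute's value list over all positives and test all-equal, then a refinement loop over negatives) by a Find-S style streaming pass: the hypothesis starts as the first positive example and is generalized attribute-by-attribute over one merged stream of labeled examples, a positive generalizing where it differs and a negative where it matches.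
-- outside the precondition, e.g. on aprender_descripcion_general([{'a': 'x'}], [{'a': 'x'}, {}]): A returns {'a': '?'}, B returns {'a': '?'}
import Mathlib
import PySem

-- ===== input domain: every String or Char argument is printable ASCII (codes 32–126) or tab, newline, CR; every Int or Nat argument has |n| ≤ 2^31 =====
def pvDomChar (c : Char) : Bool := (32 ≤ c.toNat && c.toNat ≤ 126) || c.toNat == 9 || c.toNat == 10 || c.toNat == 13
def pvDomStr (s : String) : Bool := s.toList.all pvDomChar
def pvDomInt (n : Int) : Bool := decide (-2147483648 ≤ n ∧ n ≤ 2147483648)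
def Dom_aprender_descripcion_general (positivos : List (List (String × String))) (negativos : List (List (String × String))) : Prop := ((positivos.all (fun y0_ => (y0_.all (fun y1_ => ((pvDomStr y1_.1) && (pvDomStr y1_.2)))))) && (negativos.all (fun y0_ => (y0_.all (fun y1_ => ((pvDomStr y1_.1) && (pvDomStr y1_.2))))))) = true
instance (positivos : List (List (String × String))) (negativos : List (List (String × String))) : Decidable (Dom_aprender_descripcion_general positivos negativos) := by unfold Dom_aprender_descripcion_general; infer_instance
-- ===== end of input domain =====

-- B replaces A's two staged phases by one Find-S style streaming pass over a merged labeled stream (objective: alternative).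

-- ===== PORT A =====
def aprender_descripcion_general (positivos : List (List (String × String))) (negativos : List (List (String × String))) : List (String × String) :=
  match positivos with
  | [] => []  -- positivos[0] raises IndexError; excluded by Pre_
  | p0 :: _ =>
    let posD := positivos.map PySem.Dict.ofList
    let negD := negativos.map PySem.Dict.ofList
    let base := PySem.Dict.ofList p0
    -- descripcion = {}; for key in positivos[0].keys(): ...
    let d1 : PySem.Dict String String :=
      base.keys.foldl (fun d key =>
        let valores := posD.map (fun e => e.getD key "")  -- e[key]; KeyError excluded by Pre_
        if valores.all (fun val => val == valores.headD "") then d.insert key (valores.headD "")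
        else d.insert key "?") PySem.Dict.empty
    -- for negativo in negativos: for key in descripcion: ...
    let d2 : PySem.Dict String String :=
      negD.foldl (fun d negativo =>
        d.keys.foldl (fun d key =>
          if d.getD key "" ≠ "?" then
            match negativo.get? key with
            | none => d  -- negativo[key] raises KeyError; excluded by Pre_
            | some w => if d.getD key "" == w then d.insert key "?" else d
          else d) d) d1
    d2.items

-- ===== PORT B =====
def aprender_descripcion_general_alt (positivos : List (List (String × String))) (negativos : List (List (String × String))) : List (String × String) :=
  match positivos with
  | [] => []  -- positivos[0] raises IndexError; excluded by Pre_
  | p0 :: rest =>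
    -- hipotesis = dict(positivos[0])
    let hipotesis := PySem.Dict.ofList p0
    -- etiquetados = [(e, True) for e in positivos[1:]] + [(n, False) for n in negativos]
    let etiquetados : List (PySem.Dict String String × Bool) :=
      rest.map (fun e => (PySem.Dict.ofList e, true)) ++ negativos.map (fun n => (PySem.Dict.ofList n, false))
    -- for ejemplo, es_positivo in etiquetados: for k in hipotesis: ...
    let h2 : PySem.Dict String String :=
      etiquetados.foldl (fun h p =>
        h.keys.foldl (fun hh k =>
          if hh.getD k "" ≠ "?" then
            match p.1.get? k with
            | none => hh  -- ejemplo[k] raises KeyError; excluded by Pre_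
            | some w => if (!(w == hh.getD k "")) == p.2 then hh.insert k "?" else hh
          else hh) h) hipotesis
    h2.items

-- ===== PRECONDITION & SPEC =====
-- Pre_ excludes the inputs where a dict lookup raises in either program: positivos empty (IndexError),
-- an attribute of positivos[0] missing from some positive example, or missing from some negative example
-- while all positives agree on it with a value other than '?' (KeyError).  The negative clause is slightly
-- wider than A's exact raise set: when an earlier negative already generalized the attribute to '?', a
-- later negative may lack it and A still returns; both programs return the same value there (see the
-- cite in claim.json).
def Pre_aprender_descripcion_general (positivos : List (List (String × String))) (negativos : List (List (String × String))) : Prop :=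
  positivos ≠ [] ∧
  ∀ k ∈ (PySem.Dict.ofList (positivos.headD [])).keys,
    (∀ e ∈ positivos, (PySem.Dict.ofList e).contains k = true) ∧
    ((∀ e ∈ positivos, (PySem.Dict.ofList e).getD k "" = (PySem.Dict.ofList (positivos.headD [])).getD k "") ∧
       (PySem.Dict.ofList (positivos.headD [])).getD k "" ≠ "?" →
      ∀ n ∈ negativos, (PySem.Dict.ofList n).contains k = true)
instance (positivos : List (List (String × String))) (negativos : List (List (String × String))) : Decidable (Pre_aprender_descripcion_general positivos negativos) := by unfold Pre_aprender_descripcion_general; infer_instance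

def pvWitness_aprender_descripcion_general : (List (List (String × String))) × (List (List (String × String))) :=
  ([[("color", "rojo"), ("forma", "circulo")], [("color", "rojo"), ("forma", "cuadrado")]],
   [[("color", "azul"), ("forma", "circulo")]])

def Spec_aprender_descripcion_general (positivos : List (List (String × String))) (negativos : List (List (String × String))) (out : List (String × String)) : Prop := out = aprender_descripcion_general_alt positivos negativos
instance (positivos : List (List (String × String))) (negativos : List (List (String × String))) (out : List (String × String)) : Decidable (Spec_aprender_descripcion_general positivos negativos out) := by unfold Spec_aprender_descripcion_general; infer_instance

-- ===== CLAIM (what is proved, stated in full; the proofs are below) =====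
def Claim_equal_aprender_descripcion_general : Prop := ∀ (positivos : List (List (String × String))) (negativos : List (List (String × String))), Dom_aprender_descripcion_general positivos negativos → Pre_aprender_descripcion_general positivos negativos → Spec_aprender_descripcion_general positivos negativos (aprender_descripcion_general positivos negativos)

-- ===== LEMMAS AND PROOFS =====

-- getD at k is unchanged by a fold whose steps only touch other keys.
theorem pv_foldl_getD_not_mem (step : PySem.Dict String String → String → PySem.Dict String String)
    (k : String) (hstep : ∀ d k', k' ≠ k → (step d k').getD k "" = d.getD k "")
    (l : List String) (d : PySem.Dict String String) (hk : k ∉ l) :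
    (l.foldl step d).getD k "" = d.getD k "" := by
  induction l generalizing d with
  | nil => rfl
  | cons a l ih =>
    simp only [List.mem_cons, not_or] at hk
    simp only [List.foldl_cons]
    rw [ih _ hk.2, hstep _ _ (fun h => hk.1 h.symm)]

-- getD at k after a fold over a Nodup list containing k: exactly one step acts on k.
theorem pv_foldl_getD_mem (step : PySem.Dict String String → String → PySem.Dict String String)
    (k : String) (g : String → String)
    (hstep : ∀ d k', k' ≠ k → (step d k').getD k "" = d.getD k "")
    (hself : ∀ d, (step d k).getD k "" = g (d.getD k ""))
    (l : List String) (d : PySem.Dict String String) (hnd : l.Nodup) (hk : k ∈ l) :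
    (l.foldl step d).getD k "" = g (d.getD k "") := by
  induction l generalizing d with
  | nil => cases hk
  | cons a l ih =>
    simp only [List.nodup_cons] at hnd
    simp only [List.foldl_cons]
    rcases List.mem_cons.mp hk with h | h
    · subst h
      rw [pv_foldl_getD_not_mem step k hstep l _ hnd.1, hself]
    · have hak : a ≠ k := fun he => hnd.1 (he ▸ h)
      rw [ih _ hnd.2 h, hstep _ _ hak]

-- keys are unchanged by a fold whose steps preserve keys on keys of d.
theorem pv_foldl_keys_eq (step : PySem.Dict String String → String → PySem.Dict String String)
    (hstep : ∀ d k', k' ∈ d.keys → (step d k').keys = d.keys)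
    (l : List String) (d : PySem.Dict String String) (hl : ∀ k' ∈ l, k' ∈ d.keys) :
    (l.foldl step d).keys = d.keys := by
  induction l generalizing d with
  | nil => rfl
  | cons a l ih =>
    simp only [List.foldl_cons]
    have ha := hstep d a (hl a (List.mem_cons_self))
    rw [ih _ (fun k' hk' => ha ▸ hl k' (List.mem_cons_of_mem _ hk')), ha]

-- the effect of one labeled example (row a, condition cnd a) on the value stored at key k;
-- covers both A's refinement step (cnd _ w v = v == w) and B's labeled step.
def pvStepG {α : Type} (row : α → PySem.Dict String String) (cnd : α → String → String → Bool)
    (a : α) (k v : String) : String :=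
  if v ≠ "?" then
    match (row a).get? k with
    | none => v
    | some w => if cnd a w v then "?" else v
  else v

theorem pvStepG_q {α : Type} (row : α → PySem.Dict String String) (cnd : α → String → String → Bool)
    (a : α) (k : String) : pvStepG row cnd a k "?" = "?" := by simp [pvStepG]

-- one inner pass over all keys of d, read at key k
theorem pv_inner_getD {α : Type} (row : α → PySem.Dict String String) (cnd : α → String → String → Bool)
    (a : α) (k : String)
    (d : PySem.Dict String String) (hnd : d.keys.Nodup) (hk : k ∈ d.keys) :
    (d.keys.foldl (fun dd key =>
        if dd.getD key "" ≠ "?" then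
          match (row a).get? key with
          | none => dd
          | some w => if cnd a w (dd.getD key "") then dd.insert key "?" else dd
        else dd) d).getD k ""
      = pvStepG row cnd a k (d.getD k "") := by
  apply pv_foldl_getD_mem
  · intro dd k' hne
    dsimp only
    split
    · cases hg : (row a).get? k' with
      | none => rfl
      | some w =>
        by_cases h2 : cnd a w (dd.getD k' "") = true
        · simp only [if_pos h2]
          exact PySem.Dict.getD_insert_of_ne _ _ _ (Ne.symm hne)
        · simp only [h2]; rfl
    · rfl
  · intro dd
    dsimp only [pvStepG]
    split
    · cases hg : (row a).get? k with
      | none => rfl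
      | some w =>
        by_cases h2 : cnd a w (dd.getD k "") = true
        · simp only [if_pos h2]
          exact PySem.Dict.getD_insert_self _ _ _ _
        · simp only [h2]; rfl
    · rfl
  · exact hnd
  · exact hk

theorem pv_inner_keys {α : Type} (row : α → PySem.Dict String String) (cnd : α → String → String → Bool)
    (a : α) (d : PySem.Dict String String) :
    (d.keys.foldl (fun dd key =>
        if dd.getD key "" ≠ "?" then
          match (row a).get? key with
          | none => dd
          | some w => if cnd a w (dd.getD key "") then dd.insert key "?" else dd
        else dd) d).keys = d.keys := by
  apply pv_foldl_keys_eq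
  · intro dd k' hk'
    dsimp only
    split
    · cases hg : (row a).get? k' with
      | none => rfl
      | some w =>
        by_cases h2 : cnd a w (dd.getD k' "") = true
        · simp only [if_pos h2]
          exact PySem.Dict.keys_insert_of_contains _ _ ((PySem.Dict.contains_iff_mem_keys _ _).mpr hk')
        · simp only [h2]; rfl
    · rfl
  · exact fun k' hk' => hk'

-- a whole outer fold of inner passes leaves the key list unchanged
theorem pv_phase_keys {α : Type} (row : α → PySem.Dict String String) (cnd : α → String → String → Bool)
    (l : List α) (d : PySem.Dict String String) :
    (l.foldl (fun d a =>
        d.keys.foldl (fun dd key =>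
          if dd.getD key "" ≠ "?" then
            match (row a).get? key with
            | none => dd
            | some w => if cnd a w (dd.getD key "") then dd.insert key "?" else dd
          else dd) d) d).keys = d.keys := by
  induction l generalizing d with
  | nil => rfl
  | cons a l ih => simp only [List.foldl_cons]; rw [ih, pv_inner_keys]

-- a whole outer fold of inner passes, read at key k
theorem pv_phase {α : Type} (row : α → PySem.Dict String String) (cnd : α → String → String → Bool)
    (k : String) (l : List α) :
    ∀ d : PySem.Dict String String, d.keys.Nodup → k ∈ d.keys →
    (l.foldl (fun d a =>
        d.keys.foldl (fun dd key =>
          if dd.getD key "" ≠ "?" then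
            match (row a).get? key with
            | none => dd
            | some w => if cnd a w (dd.getD key "") then dd.insert key "?" else dd
          else dd) d) d).getD k ""
      = l.foldl (fun v a => pvStepG row cnd a k v) (d.getD k "") := by
  induction l with
  | nil => exact fun d _ _ => rfl
  | cons a l ih =>
    intro d hnd hk
    simp only [List.foldl_cons]
    have hkeys := pv_inner_keys row cnd a d
    have hgd := pv_inner_getD row cnd a k d hnd hk
    rw [ih _ (by rw [hkeys]; exact hnd) (by rw [hkeys]; exact hk), hgd]

-- items of a whole outer fold: per-key traces over the list
theorem pv_core {α : Type} (row : α → PySem.Dict String String) (cnd : α → String → String → Bool)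
    (l : List α) (ks : List String) (hnd : ks.Nodup)
    (d1 : PySem.Dict String String) (h1k : d1.keys = ks) :
    (l.foldl (fun d a =>
        d.keys.foldl (fun dd key =>
          if dd.getD key "" ≠ "?" then
            match (row a).get? key with
          | none => dd
          | some w => if cnd a w (dd.getD key "") then dd.insert key "?" else dd
          else dd) d) d1).items
      = ks.map (fun k => (k, l.foldl (fun v a => pvStepG row cnd a k v) (d1.getD k ""))) := by
  have h2k := pv_phase_keys row cnd l d1
  rw [PySem.Dict.items_eq_map_keys _ (by rw [h2k, h1k]; exact hnd) "", h2k, h1k]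
  apply List.map_congr_left
  intro k hk
  rw [pv_phase row cnd k l d1 (by rw [h1k]; exact hnd) (by rw [h1k]; exact hk)]

-- the value A's first phase stores at key k
def pvInit (posD : List (PySem.Dict String String)) (k : String) : String :=
  let valores := posD.map (fun e => e.getD k "")
  if valores.all (fun val => val == valores.headD "") then valores.headD "" else "?"

theorem pv_phase1_keys (posD : List (PySem.Dict String String)) (ks : List String)
    (hnd : ks.Nodup) :
    (ks.foldl (fun d key =>
        let valores := posD.map (fun e => e.getD key "")
        if valores.all (fun val => val == valores.headD "") then d.insert key (valores.headD "")
        else d.insert key "?") PySem.Dict.empty).keys = ks := by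
  have hfun : (fun (d : PySem.Dict String String) key =>
        let valores := posD.map (fun e => e.getD key "")
        if valores.all (fun val => val == valores.headD "") then d.insert key (valores.headD "")
        else d.insert key "?")
      = fun d key => d.insert key (pvInit posD key) := by
    funext d key
    dsimp only [pvInit]
    split <;> rfl
  rw [hfun]
  have h := PySem.Dict.keys_foldl_insert ks (fun _ key => pvInit posD key) PySem.Dict.empty
  rw [h, PySem.Dict.keys_empty, PySem.Set.update_nil_left,
     PySem.Set.ofList_eq_self_of_nodup _ hnd]

theorem pv_phase1_getD (posD : List (PySem.Dict String String)) (ks : List String)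
    (hnd : ks.Nodup) (k : String) (hk : k ∈ ks) :
    (ks.foldl (fun d key =>
        let valores := posD.map (fun e => e.getD key "")
        if valores.all (fun val => val == valores.headD "") then d.insert key (valores.headD "")
        else d.insert key "?") PySem.Dict.empty).getD k "" = pvInit posD k := by
  apply pv_foldl_getD_mem (g := fun _ => pvInit posD k)
  · intro dd k' hne
    dsimp only
    split <;> exact PySem.Dict.getD_insert_of_ne _ _ _ (Ne.symm hne)
  · intro dd
    dsimp only
    rw [show pvInit posD k
        = (if ((posD.map (fun e => e.getD k "")).all
              (fun val => val == (posD.map (fun e => e.getD k "")).headD ""))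
           then (posD.map (fun e => e.getD k "")).headD "" else "?") from rfl]
    split <;> exact PySem.Dict.getD_insert_self _ _ _ _
  · exact hnd
  · exact hk

-- characterization of A: first phase values, then per-key trace of the refinement fold
theorem pv_A_eq (p0 : List (String × String)) (rest negativos : List (List (String × String))) :
    aprender_descripcion_general (p0 :: rest) negativos
      = (PySem.Dict.ofList p0).keys.map (fun k =>
          (k, (negativos.map PySem.Dict.ofList).foldl
                (fun v n => pvStepG (fun n => n) (fun _ w v => v == w) n k v)
                (pvInit ((p0 :: rest).map PySem.Dict.ofList) k))) := by
  simp only [aprender_descripcion_general]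
  have hnd : (PySem.Dict.ofList p0).keys.Nodup := PySem.Dict.nodup_keys_ofList p0
  rw [pv_core (fun n => n) (fun _ w v => v == w) (negativos.map PySem.Dict.ofList)
      (PySem.Dict.ofList p0).keys hnd _
      (pv_phase1_keys ((p0 :: rest).map PySem.Dict.ofList) _ hnd)]
  apply List.map_congr_left
  intro k hk
  rw [pv_phase1_getD _ _ hnd k hk]

-- characterization of B: per-key trace of the single labeled fold
theorem pv_B_eq (p0 : List (String × String)) (rest negativos : List (List (String × String))) :
    aprender_descripcion_general_alt (p0 :: rest) negativos
      = (PySem.Dict.ofList p0).keys.map (fun k =>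
          (k, (rest.map (fun e => (PySem.Dict.ofList e, true))
                ++ negativos.map (fun n => (PySem.Dict.ofList n, false))).foldl
                (fun v p => pvStepG Prod.fst (fun p w v => (!(w == v)) == p.2) p k v)
                ((PySem.Dict.ofList p0).getD k ""))) := by
  simp only [aprender_descripcion_general_alt]
  exact pv_core Prod.fst (fun p w v => (!(w == v)) == p.2) _ _
    (PySem.Dict.nodup_keys_ofList p0) _ rfl

-- B's labeled step on a negative example is exactly A's refinement step
theorem pv_step_neg (n : PySem.Dict String String) (k v : String) :
    pvStepG Prod.fst (fun p w v => (!(w == v)) == p.2) (n, false) k v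
      = pvStepG (fun n => n) (fun _ w v => v == w) n k v := by
  dsimp only [pvStepG]
  split
  · cases hg : n.get? k with
    | none => rfl
    | some w =>
      have : ((!(w == v)) == false) = (v == w) := by
        by_cases h : w = v
        · simp [h]
        · simp [beq_eq_false_iff_ne.mpr h, beq_eq_false_iff_ne.mpr (Ne.symm h)]
      simp only [this]
  · rfl

-- B's positive-part fold keeps '?'
theorem pv_trace_pos_q (k : String) (l : List (List (String × String))) :
    l.foldl (fun v e => pvStepG Prod.fst (fun p w v => (!(w == v)) == p.2) (PySem.Dict.ofList e, true) k v) "?" = "?" := by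
  induction l with
  | nil => rfl
  | cons e l ih => simp only [List.foldl_cons, pvStepG_q]; exact ih

-- trace of B's positive steps: v0 survives iff every example still carries v0 at k
theorem pv_trace_pos (k : String) (l : List (List (String × String))) (v0 : String)
    (hv : v0 ≠ "?") (hl : ∀ e ∈ l, (PySem.Dict.ofList e).contains k = true) :
    l.foldl (fun v e => pvStepG Prod.fst (fun p w v => (!(w == v)) == p.2) (PySem.Dict.ofList e, true) k v) v0
      = if l.all (fun e => (PySem.Dict.ofList e).getD k "" == v0) then v0 else "?" := by
  induction l with
  | nil => simp
  | cons e l ih =>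
    have hc := hl e List.mem_cons_self
    rw [PySem.Dict.contains_eq_isSome_get?] at hc
    obtain ⟨w, hw⟩ := Option.isSome_iff_exists.mp hc
    have hgd : (PySem.Dict.ofList e).getD k "" = w := PySem.Dict.getD_of_get?_eq_some _ _ hw
    have hstep : pvStepG Prod.fst (fun p w v => (!(w == v)) == p.2) (PySem.Dict.ofList e, true) k v0
        = if w == v0 then v0 else "?" := by
      simp only [pvStepG, if_pos hv, hw]
      by_cases h : w = v0
      · simp [h]
      · simp [beq_eq_false_iff_ne.mpr h]
    simp only [List.foldl_cons, List.all_cons, hstep, hgd]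
    by_cases h : w = v0
    · have h1 : (w == v0) = true := beq_iff_eq.mpr h
      simp only [h1, Bool.true_and]
      exact ih (fun m hm => hl m (List.mem_cons_of_mem _ hm))
    · have h1 : (w == v0) = false := beq_eq_false_iff_ne.mpr h
      simp only [h1, Bool.false_and, Bool.false_eq_true, if_neg (fun hcc => hcc)]
      exact pv_trace_pos_q k l

-- B's positive-part trace equals A's first-phase value at k
theorem pv_pos_init (p0 : List (String × String)) (rest : List (List (String × String)))
    (k : String)
    (hcont : ∀ e ∈ (p0 :: rest : List (List (String × String))), (PySem.Dict.ofList e).contains k = true) :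
    rest.foldl (fun v e => pvStepG Prod.fst (fun p w v => (!(w == v)) == p.2) (PySem.Dict.ofList e, true) k v)
        ((PySem.Dict.ofList p0).getD k "")
      = pvInit ((p0 :: rest).map PySem.Dict.ofList) k := by
  have hinit : pvInit ((p0 :: rest).map PySem.Dict.ofList) k
      = if rest.all (fun e => (PySem.Dict.ofList e).getD k "" == (PySem.Dict.ofList p0).getD k "")
        then (PySem.Dict.ofList p0).getD k "" else "?" := by
    simp [pvInit, List.all_map, Function.comp_def]
  rw [hinit]
  by_cases hq : (PySem.Dict.ofList p0).getD k "" = "?"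
  · rw [hq]
    rw [pv_trace_pos_q k rest]
    split <;> rfl
  · exact pv_trace_pos k rest _ hq (fun e he => hcont e (List.mem_cons_of_mem _ he))

-- ===== VERDICT (by name: the statement is the Claim_ definition above) =====
theorem aprender_descripcion_general_spec : Claim_equal_aprender_descripcion_general := by
  intro positivos negativos _hdom hpre
  obtain ⟨hne, hks⟩ := hpre
  unfold Spec_aprender_descripcion_general
  cases positivos with
  | nil => exact absurd rfl hne
  | cons p0 rest =>
    rw [pv_A_eq, pv_B_eq]
    apply List.map_congr_left
    intro k hk
    have hk' : k ∈ (PySem.Dict.ofList ((p0 :: rest : List (List (String × String))).headD [])).keys := by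
      simpa using hk
    have hcont := (hks k hk').1
    rw [List.foldl_append]
    simp only [List.foldl_map]
    rw [pv_pos_init p0 rest k hcont]
    have hf : (fun (x : String) (y : List (String × String)) =>
          pvStepG (fun n => n) (fun _ w v => v == w) (PySem.Dict.ofList y) k x)
        = (fun (x : String) (y : List (String × String)) =>
          pvStepG Prod.fst (fun p w v => (!(w == v)) == p.2) (PySem.Dict.ofList y, false) k x) := by
      funext v n
      exact (pv_step_neg (PySem.Dict.ofList n) k v).symm
    rw [hf]
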